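-- pv_equiv track=rewrite | github.com/verisimilitude20201/competitive-programming | CTCD/Arrays_And_Strings/is_permutation_of_a_palindrome.py | create_bit_vector
-- ===== SOURCE A (Python) =====
-- def create_bit_vector(string):
--     ord_a = ord("a")
--     ord_z = ord("z")
--     bit_vector = 0
--     for char in string:
--          if ord_a <= ord(char) <= ord_z:
--              index = ord(char) - ord_a
--              mask = 1 << index
--              if bit_vector & mask == 0:
--                  bit_vector |= mask
--              else:
--                  bit_vector &= ~mask
--
--     return bit_vector
-- ===== SOURCE B (Python) =====
-- def create_bit_vector(string):
--     counts = {}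
--     for char in string:
--         counts[char] = counts.get(char, 0) + 1
--     bit_vector = 0
--     for i in range(26):
--         if counts.get(chr(ord("a") + i), 0) % 2 == 1:
--             bit_vector += 1 << i
--     return bit_vector
-- ===== Notes on version B (the rewrite author's own statement) =====
-- stated objective: alternative
-- what changed: Replaces the in-loop bit toggling with a two-phase count-then-parity pass: first build a character frequency dict, then scan the 26 lowercase letters and add the bit for each letter with an odd count.
import Mathlib
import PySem

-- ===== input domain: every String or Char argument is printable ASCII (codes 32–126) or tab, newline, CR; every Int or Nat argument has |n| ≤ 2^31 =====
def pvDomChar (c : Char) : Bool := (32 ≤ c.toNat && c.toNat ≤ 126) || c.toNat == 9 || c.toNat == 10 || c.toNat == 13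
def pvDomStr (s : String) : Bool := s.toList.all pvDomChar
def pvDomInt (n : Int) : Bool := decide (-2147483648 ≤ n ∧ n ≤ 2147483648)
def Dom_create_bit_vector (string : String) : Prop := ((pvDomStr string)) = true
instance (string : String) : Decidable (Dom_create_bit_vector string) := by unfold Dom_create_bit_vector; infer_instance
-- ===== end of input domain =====

-- B replaces A's in-loop bit toggling by a count-then-parity pass (frequency dict, then one scan over 'a'..'z'): a different decomposition a timing run measured as constant-factor faster.

-- ===== PORT A =====
-- A's loop body, lifted to a named helper (literal transliteration of the body of A's for-loop).
def pvStepA (bit_vector : Int) (char : Char) : Int :=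
  let ord_a : Int := 97
  let ord_z : Int := 122
  if ord_a ≤ (char.toNat : Int) ∧ (char.toNat : Int) ≤ ord_z then
    let index : Int := (char.toNat : Int) - ord_a
    let mask : Int := (1 : Int) <<< index.toNat
    if PySem.Int.band bit_vector mask = 0 then
      PySem.Int.bor bit_vector mask
    else
      PySem.Int.band bit_vector (Int.not mask)
  else bit_vector

def create_bit_vector (string : String) : Int :=
  string.toList.foldl pvStepA 0

-- ===== PORT B =====
def create_bit_vector_alt (string : String) : Int :=
  let counts : PySem.Dict Char Int :=
    string.toList.foldl (fun d char => d.insert char (d.getD char 0 + 1)) PySem.Dict.empty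
  (PySem.List.pyRange 0 26).foldl (fun bit_vector i =>
    if PySem.Int.mod (counts.getD (Char.ofNat ((97 + i).toNat)) 0) 2 = 1 then
      bit_vector + ((1 : Int) <<< i.toNat)
    else bit_vector) 0

-- ===== PRECONDITION & SPEC =====
def Spec_create_bit_vector (string : String) (out : Int) : Prop := out = create_bit_vector_alt string
instance (string : String) (out : Int) : Decidable (Spec_create_bit_vector string out) := by unfold Spec_create_bit_vector; infer_instance

-- ===== CLAIM (what is proved, stated in full; the proofs are below) =====
def Claim_equal_create_bit_vector : Prop := ∀ (string : String), Dom_create_bit_vector string → Spec_create_bit_vector string (create_bit_vector string)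

-- ===== LEMMAS AND PROOFS =====

-- the number whose first k bits (little-endian) are given by the bit function b
def pvNum : (Nat → Bool) → Nat → Nat
  | _, 0 => 0
  | b, k+1 => (if b 0 then 1 else 0) + 2 * pvNum (fun i => b (i + 1)) k

-- parity of the count of letter number i in l
def pvPar (l : List Char) (i : Nat) : Bool := decide (l.count (Char.ofNat (97 + i)) % 2 = 1)

theorem pvNum_congr (k : Nat) (b b' : Nat → Bool) (h : ∀ i < k, b i = b' i) :
    pvNum b k = pvNum b' k := by
  induction k generalizing b b' with
  | zero => rfl
  | succ k ih =>
    simp only [pvNum, h 0 (Nat.succ_pos _)]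
    rw [ih _ _ (fun i hi => h (i+1) (by omega))]

theorem pvNum_testBit (k : Nat) (b : Nat → Bool) (j : Nat) :
    (pvNum b k).testBit j = (decide (j < k) && b j) := by
  induction k generalizing b j with
  | zero => simp [pvNum]
  | succ k ih =>
    cases j with
    | zero =>
      simp only [pvNum, Nat.testBit_zero]
      cases h : b 0 <;> simp
    | succ j =>
      rw [pvNum, Nat.testBit_succ]
      have : ((if b 0 then 1 else 0) + 2 * pvNum (fun i => b (i + 1)) k) / 2
          = pvNum (fun i => b (i + 1)) k := by split_ifs <;> omega
      rw [this, ih]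
      simp

theorem pvNum_false (k : Nat) : pvNum (fun _ => false) k = 0 := by
  induction k with
  | zero => rfl
  | succ k ih => simp [pvNum, ih]

theorem pvNum_update (k j : Nat) (b : Nat → Bool) (hj : j < k) :
    pvNum b k = pvNum (fun i => if i = j then false else b i) k + (if b j then 2 ^ j else 0) := by
  induction k generalizing b j with
  | zero => omega
  | succ k ih =>
    cases j with
    | zero =>
      simp only [pvNum]
      have ht : pvNum (fun i => b (i + 1)) k
          = pvNum (fun i => if i + 1 = 0 then false else b (i + 1)) k := by
        apply pvNum_congr; intro i _; simp
      rw [← ht]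
      split_ifs <;> simp_all <;> omega
    | succ j =>
      simp only [pvNum]
      have ht : pvNum (fun i => b (i + 1)) k
          = pvNum (fun i => if i = j then false else b (i + 1)) k + (if b (j + 1) then 2 ^ j else 0) := by
        have := ih j (fun i => b (i + 1)) (by omega)
        simpa using this
      rw [ht]
      have : pvNum (fun i => if i = j then false else b (i + 1)) k
          = pvNum (fun i => if i + 1 = j + 1 then false else b (i + 1)) k := by
        apply pvNum_congr; intro i _; simp
      rw [this]
      split_ifs <;> first | exact ‹False›.elim | ring

theorem pvNum_succ_high (k : Nat) (b : Nat → Bool) :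
    pvNum b (k + 1) = pvNum b k + (if b k then 2 ^ k else 0) := by
  induction k generalizing b with
  | zero => simp [pvNum]
  | succ k ih =>
    show (if b 0 then 1 else 0) + 2 * pvNum (fun i => b (i + 1)) (k + 1) = _
    rw [ih]
    show _ = (if b 0 then 1 else 0) + 2 * pvNum (fun i => b (i + 1)) k + _
    split_ifs <;> ring

-- a & (1<<j) for an encoded state
theorem pvBand (j : Nat) (b : Nat → Bool) (hj : j < 26) :
    pvNum b 26 &&& 2 ^ j = if b j then 2 ^ j else 0 := by
  apply Nat.eq_of_testBit_eq
  intro i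
  rw [Nat.testBit_land, pvNum_testBit, Nat.testBit_two_pow]
  by_cases hij : j = i
  · subst hij
    cases hbj : b j <;> simp [hbj, hj]
  · cases hbj : b j <;> simp [hbj, hij]

theorem pvBor (j : Nat) (b : Nat → Bool) (hj : j < 26) :
    pvNum b 26 ||| 2 ^ j = pvNum (fun i => if i = j then true else b i) 26 := by
  apply Nat.eq_of_testBit_eq
  intro i
  rw [Nat.testBit_lor, pvNum_testBit, Nat.testBit_two_pow, pvNum_testBit]
  by_cases hij : i = j
  · subst hij; simp [hj]
  · have hji : j ≠ i := fun h => hij h.symm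
    simp [hij, hji]

theorem pvBandNot (n m : Nat) : PySem.Int.band (n : Int) (Int.not (m : Int)) = ((n - (n &&& m) : Nat) : Int) := by
  simp [PySem.Int.band, Int.not]

theorem pvShift (j : Nat) : (1 : Int) <<< j = ((2 ^ j : Nat) : Int) := by
  rw [Int.shiftLeft_eq]; push_cast; ring

theorem pvChar_toNat (i : Nat) (hi : i < 26) : (Char.ofNat (97 + i)).toNat = 97 + i := by
  interval_cases i <;> decide

theorem pvChar_eq (c : Char) (i : Nat) (hi : i < 26) (h : c.toNat = 97 + i) :
    c = Char.ofNat (97 + i) :=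
  Char.ext (UInt32.toNat_inj.mp (h.trans (pvChar_toNat i hi).symm))

theorem pvPar_cons_ne (c : Char) (l : List Char) (i : Nat) (hi : i < 26)
    (hne : c.toNat ≠ 97 + i) : pvPar (c :: l) i = pvPar l i := by
  unfold pvPar
  rw [List.count_cons_of_ne]
  intro h
  exact hne (by rw [h, pvChar_toNat i hi])

theorem pvPar_cons_self (c : Char) (l : List Char) (i : Nat) (hi : i < 26)
    (heq : c.toNat = 97 + i) : pvPar (c :: l) i = !pvPar l i := by
  unfold pvPar
  rw [← pvChar_eq c i hi heq, List.count_cons_self]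
  generalize l.count c = n
  rcases Nat.mod_two_eq_zero_or_one n with h | h <;> simp [Nat.add_mod, h]

-- one step of A on an encoded state: not a lowercase letter
theorem pvStepA_other (v : Int) (c : Char) (hc : ¬(97 ≤ c.toNat ∧ c.toNat ≤ 122)) :
    pvStepA v c = v := by
  simp only [pvStepA]
  rw [if_neg]
  intro ⟨h1, h2⟩
  exact hc ⟨by exact_mod_cast h1, by exact_mod_cast h2⟩

-- one step of A on an encoded state: lowercase letter number j gets its bit flipped
theorem pvStepA_lower (b : Nat → Bool) (c : Char) (j : Nat) (hj : j < 26)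
    (hcj : c.toNat = 97 + j) :
    pvStepA ((pvNum b 26 : Nat) : Int) c
      = ((pvNum (fun i => if i = j then !b i else b i) 26 : Nat) : Int) := by
  simp only [pvStepA]
  rw [if_pos (by constructor <;> [exact_mod_cast (by omega : (97:Nat) ≤ c.toNat); exact_mod_cast (by omega : c.toNat ≤ 122)])]
  have hidx : (((c.toNat : Int) - 97)).toNat = j := by omega
  rw [hidx, pvShift, PySem.Int.band_natCast, pvBand j b hj]
  cases hbj : b j with
  | false =>
    rw [if_pos (by simp [hbj]), PySem.Int.bor_natCast, pvBor j b hj]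
    refine congrArg _ (pvNum_congr 26 _ _ ?_)
    intro i _
    by_cases hij : i = j <;> simp [hij, hbj]
  | true =>
    rw [if_neg (by simp [hbj]), pvBandNot, pvBand j b hj, if_pos hbj]
    have hupd := pvNum_update 26 j b hj
    rw [hbj, if_pos rfl] at hupd
    have hsub : pvNum b 26 - 2 ^ j = pvNum (fun i => if i = j then false else b i) 26 := by omega
    rw [hsub]
    refine congrArg _ (pvNum_congr 26 _ _ ?_)
    intro i _
    by_cases hij : i = j <;> simp [hij, hbj]

-- A's whole loop on an encoded state XORs in the letter-count parities
theorem pvA_inv (l : List Char) (b : Nat → Bool) :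
    l.foldl pvStepA ((pvNum b 26 : Nat) : Int)
      = ((pvNum (fun i => xor (b i) (pvPar l i)) 26 : Nat) : Int) := by
  induction l generalizing b with
  | nil =>
    simp only [List.foldl_nil]
    refine congrArg _ (pvNum_congr 26 _ _ ?_)
    intro i _
    simp [pvPar]
  | cons c l ih =>
    rw [List.foldl_cons]
    by_cases hc : 97 ≤ c.toNat ∧ c.toNat ≤ 122
    · obtain ⟨h1, h2⟩ := hc
      set j := c.toNat - 97 with hjdef
      have hj : j < 26 := by omega
      have hcj : c.toNat = 97 + j := by omega
      rw [pvStepA_lower b c j hj hcj, ih]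
      refine congrArg _ (pvNum_congr 26 _ _ ?_)
      intro i hi
      by_cases hij : i = j
      · rw [hij, pvPar_cons_self c l j hj hcj]
        simp only [if_pos rfl]
        cases b j <;> cases pvPar l j <;> rfl
      · rw [pvPar_cons_ne c l i hi (by omega)]
        simp [hij]
    · rw [pvStepA_other _ c hc, ih]
      refine congrArg _ (pvNum_congr 26 _ _ ?_)
      intro i hi
      rw [pvPar_cons_ne c l i hi (by intro h; exact hc ⟨by omega, by omega⟩)]

-- B's letter scan builds exactly the parity number
theorem pvB_range (l : List Char) (k : Nat) (hk : k ≤ 26) :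
    (List.range k).foldl (fun acc i =>
        if pvPar l i then acc + ((2 ^ i : Nat) : Int) else acc) 0
      = ((pvNum (pvPar l) k : Nat) : Int) := by
  induction k with
  | zero => simp [pvNum]
  | succ k ih =>
    rw [List.range_succ, List.foldl_append, ih (by omega), List.foldl_cons, List.foldl_nil,
      pvNum_succ_high]
    split_ifs with h <;> push_cast <;> ring

theorem pvB_eq (s : String) :
    create_bit_vector_alt s = ((pvNum (pvPar s.toList) 26 : Nat) : Int) := by
  unfold create_bit_vector_alt
  have h26 : (26 : Int) = ((26 : Nat) : Int) := by norm_num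
  rw [h26, PySem.List.pyRange_zero_natCast, List.foldl_map]
  rw [← pvB_range s.toList 26 (by omega)]
  apply PySem.List.foldl_congr_mem
  intro acc k _
  have hk : ((97 : Int) + (k : Int)).toNat = 97 + k := by omega
  rw [hk, PySem.Dict.getD_foldl_insert_add_one]
  have hempty : (PySem.Dict.empty (κ := Char) (ν := Int)).getD (Char.ofNat (97 + k)) 0 = 0 := by
    simp [PySem.Dict.empty, PySem.Dict.getD, PySem.Dict.get?]
  rw [hempty, zero_add]
  have hmod : PySem.Int.mod ((s.toList.count (Char.ofNat (97 + k)) : Nat) : Int) 2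
      = ((s.toList.count (Char.ofNat (97 + k)) % 2 : Nat) : Int) := by
    exact_mod_cast PySem.Int.mod_natCast (s.toList.count (Char.ofNat (97 + k))) 2
  rw [hmod]
  have hcond : (((s.toList.count (Char.ofNat (97 + k)) % 2 : Nat) : Int) = 1) ↔ pvPar s.toList k = true := by
    simp only [pvPar, decide_eq_true_eq]
    omega
  rw [Int.toNat_natCast]
  have hsh : (1 : Int) <<< ((k : Nat) : Int) = ((2 ^ k : Nat) : Int) := Int.one_shiftLeft k
  rw [hsh]
  by_cases h : pvPar s.toList k = true
  · rw [if_pos (hcond.mpr h), if_pos h]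
  · rw [if_neg (fun hh => h (hcond.mp hh)), if_neg h]

-- ===== VERDICT (by name: the statement is the Claim_ definition above) =====
theorem create_bit_vector_spec : Claim_equal_create_bit_vector := by
  intro s _
  unfold Spec_create_bit_vector create_bit_vector
  rw [pvB_eq]
  have h0 : (0 : Int) = ((pvNum (fun _ => false) 26 : Nat) : Int) := by
    rw [pvNum_false]; rfl
  rw [h0, pvA_inv]
  refine congrArg _ (pvNum_congr 26 _ _ ?_)
  intro i _
  simp
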